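-- pv_equiv track=rewrite | github.com/zotoio/zoto-agents | .cursor/skills/crux-utils/scripts/crux-utils.py | _extract_prose
-- ===== SOURCE A (Python) =====
-- def _extract_prose(text: str) -> str:
--     lines: list[str] = []
--     in_block = False
--     for line in text.splitlines():
--         if line.startswith("```"):
--             in_block = not in_block
--             continue
--         if not in_block:
--             lines.append(line)
--     return "\n".join(lines)
-- ===== SOURCE B (Python) =====
-- def _extract_prose(text: str) -> str:
--     # Split into segments bounded by ``` fence lines (fences dropped), then
--     # keep the even-indexed segments: those lie outside the fenced blocks.
--     segments = []
--     current = []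
--     for line in text.splitlines():
--         if line.startswith("```"):
--             segments.append(current)
--             current = []
--         else:
--             current.append(line)
--     segments.append(current)
--     prose = [ln for i, seg in enumerate(segments) if i % 2 == 0 for ln in seg]
--     return "\n".join(prose)
-- ===== Notes on version B (the rewrite author's own statement) =====
-- stated objective: alternative
-- what changed: Replaces A's running in_block boolean filter with a partition of the lines into fence-bounded segments followed by selection of the even-indexed (outside) segments via enumerate, flattened and joined once.
import Mathlib
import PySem

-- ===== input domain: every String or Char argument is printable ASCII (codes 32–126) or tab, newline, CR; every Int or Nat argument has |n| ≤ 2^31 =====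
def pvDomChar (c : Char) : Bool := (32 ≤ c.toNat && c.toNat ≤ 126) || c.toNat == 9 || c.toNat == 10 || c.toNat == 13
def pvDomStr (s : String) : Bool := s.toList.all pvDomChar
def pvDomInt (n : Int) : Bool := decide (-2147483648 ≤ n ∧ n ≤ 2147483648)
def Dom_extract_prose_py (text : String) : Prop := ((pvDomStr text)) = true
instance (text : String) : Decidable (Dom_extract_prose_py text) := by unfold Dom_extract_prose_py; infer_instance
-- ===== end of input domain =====

-- B replaces A's running in-block boolean filter by a partition of the lines into
-- fence-bounded segments followed by even-indexed segment selection (objective: alternative).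

-- ===== PORT A =====
def extract_prose_py (text : String) : String :=
  let st := (PySem.Str.splitlines text).foldl
    (fun (st : List String × Bool) line =>
      if PySem.Str.startswith line "```" then (st.1, !st.2)
      else if !st.2 then (st.1 ++ [line], st.2) else st)
    ([], false)
  PySem.Str.join "\n" st.1

-- ===== PORT B =====
def extract_prose_py_alt (text : String) : String :=
  let st := (PySem.Str.splitlines text).foldl
    (fun (st : List (List String) × List String) line =>
      if PySem.Str.startswith line "```" then (st.1 ++ [st.2], [])
      else (st.1, st.2 ++ [line]))
    ([], [])
  let segments := st.1 ++ [st.2]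
  let prose := (PySem.List.enumerate segments).flatMap
    (fun p => if p.1 % 2 = 0 then p.2 else [])
  PySem.Str.join "\n" prose

-- ===== PRECONDITION & SPEC =====
def Spec_extract_prose_py (text : String) (out : String) : Prop := out = extract_prose_py_alt text
instance (text : String) (out : String) : Decidable (Spec_extract_prose_py text out) := by unfold Spec_extract_prose_py; infer_instance

-- ===== CLAIM (what is proved, stated in full; the proofs are below) =====
def Claim_equal_extract_prose_py : Prop := ∀ (text : String), Dom_extract_prose_py text → Spec_extract_prose_py text (extract_prose_py text)

-- ===== LEMMAS AND PROOFS =====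
-- the even-indexed flattening of B, as a function of the segment list
def pvProse (segs : List (List String)) : List String :=
  (PySem.List.enumerate segs).flatMap (fun p => if p.1 % 2 = 0 then p.2 else [])

theorem pvProse_append_singleton (xs : List (List String)) (y : List String) :
    pvProse (xs ++ [y]) = pvProse xs ++ (if xs.length % 2 = 0 then y else []) := by
  unfold pvProse
  rw [PySem.List.enumerate_append, List.flatMap_append]
  congr 1
  simp only [PySem.List.enumerate_cons, PySem.List.enumerate_nil, List.flatMap_cons,
    List.flatMap_nil, List.append_nil, Int.zero_add]
  by_cases h : xs.length % 2 = 0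
  · have h2 : (xs.length : Int) % 2 = 0 := by omega
    simp [h, h2]
  · have h2 : ¬ (xs.length : Int) % 2 = 0 := by omega
    simp [h, h2]

theorem pv_invariant (ls : List String) (lines : List String) (b : Bool)
    (done : List (List String)) (cur : List String)
    (hb : b = decide (done.length % 2 = 1))
    (hl : lines = pvProse (done ++ [cur])) :
    (ls.foldl
      (fun (st : List String × Bool) line =>
        if PySem.Str.startswith line "```" then (st.1, !st.2)
        else if !st.2 then (st.1 ++ [line], st.2) else st)
      (lines, b)).1
    = pvProse
        ((ls.foldl
          (fun (st : List (List String) × List String) line =>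
            if PySem.Str.startswith line "```" then (st.1 ++ [st.2], [])
            else (st.1, st.2 ++ [line]))
          (done, cur)).1
         ++ [(ls.foldl
          (fun (st : List (List String) × List String) line =>
            if PySem.Str.startswith line "```" then (st.1 ++ [st.2], [])
            else (st.1, st.2 ++ [line]))
          (done, cur)).2]) := by
  induction ls generalizing lines b done cur with
  | nil => simpa using hl
  | cons line rest ih =>
      by_cases hf : PySem.Str.startswith line "```" = true
      · simp only [List.foldl_cons, hf, if_pos]
        refine ih _ _ (done ++ [cur]) [] ?_ ?_
        · by_cases h2 : done.length % 2 = 1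
          · have h3 : ¬ (done.length + 1) % 2 = 1 := by omega
            simp [hb, h2, h3]
          · have h3 : (done.length + 1) % 2 = 1 := by omega
            simp [hb, h2, h3]
        · rw [hl, pvProse_append_singleton (done ++ [cur]) [],
              pvProse_append_singleton done cur]
          by_cases h2 : done.length % 2 = 0 <;> simp [h2, List.length_append]
      · simp only [List.foldl_cons, hf, if_neg, Bool.false_eq_true, not_false_iff]
        by_cases h2 : done.length % 2 = 1
        · -- inside a block: A skips, B appends to an odd-indexed (dropped) segment
          have hb' : b = true := by simp [hb, h2]
          subst hb'
          simp only [Bool.not_true, Bool.false_eq_true, if_false]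
          refine ih _ _ done (cur ++ [line]) hb ?_
          rw [hl, pvProse_append_singleton done cur,
              pvProse_append_singleton done (cur ++ [line])]
          have : ¬ done.length % 2 = 0 := by omega
          simp [this]
        · have hb' : b = false := by simp [hb, h2]
          subst hb'
          simp only [Bool.not_false, if_pos]
          refine ih _ _ done (cur ++ [line]) hb ?_
          rw [hl, pvProse_append_singleton done cur,
              pvProse_append_singleton done (cur ++ [line])]
          have : done.length % 2 = 0 := by omega
          simp [this]

-- ===== VERDICT (by name: the statement is the Claim_ definition above) =====
theorem extract_prose_py_spec : Claim_equal_extract_prose_py := by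
  intro text _
  unfold Spec_extract_prose_py extract_prose_py extract_prose_py_alt
  have h := pv_invariant (PySem.Str.splitlines text) [] false [] []
    (by simp) (by simp [pvProse, PySem.List.enumerate_cons, PySem.List.enumerate_nil])
  simp only [h, pvProse]
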